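-- pv_equiv track=rewrite | github.com/jasminelleong/Project-Euler | 028.py | get_spiral_corners
-- ===== SOURCE A (Python) =====
-- def get_spiral_corners(width):
--     if width == 1:
--         return [1]
--
--     smaller_grid = get_spiral_corners(width - 2)
--     largest_smaller_grid_corner = smaller_grid[-1]
--     if smaller_grid[0] == 1:
--         corner_distance = 2
--     else:
--         corner_distance = (smaller_grid[1] - smaller_grid[0]) + 2
--
--     corners = []
--     for i in range(4):
--         corners.append(largest_smaller_grid_corner + corner_distance + (corner_distance * i))
--
--     return corners
-- ===== SOURCE B (Python) =====
-- def get_spiral_corners(width):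
--     if width < 1 or width % 2 == 0:
--         raise ValueError("width must be a positive odd integer")
--     if width == 1:
--         return [1]
--     return [width * width - k * (width - 1) for k in (3, 2, 1, 0)]
-- ===== Notes on version B (the rewrite author's own statement) =====
-- stated objective: faster
-- what changed: Replaces the O(width) recursion through all smaller rings by the closed form corners = w^2 - k(w-1) for k = 3,2,1,0, with an explicit ValueError guard on the invalid (even or non-positive) widths where A's recursion never terminates.
import Mathlib
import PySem

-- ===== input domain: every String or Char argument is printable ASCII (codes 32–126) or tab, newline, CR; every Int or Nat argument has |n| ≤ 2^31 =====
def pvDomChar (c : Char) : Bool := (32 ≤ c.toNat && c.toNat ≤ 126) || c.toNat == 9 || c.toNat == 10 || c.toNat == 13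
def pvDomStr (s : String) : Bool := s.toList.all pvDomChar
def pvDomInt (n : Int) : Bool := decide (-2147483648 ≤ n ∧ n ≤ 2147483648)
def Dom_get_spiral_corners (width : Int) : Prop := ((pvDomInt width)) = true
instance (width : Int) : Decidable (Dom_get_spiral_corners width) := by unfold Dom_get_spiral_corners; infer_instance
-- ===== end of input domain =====

-- B replaces A's O(width) recursion through smaller rings by the closed form w^2 - k(w-1), k = 3,2,1,0.


-- ===== PORT A =====
-- A is recursive; fuel bounds the recursion depth (inside Pre_ the fuel never runs out,
-- outside Pre_ the Python recursion does not terminate and nothing is claimed).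
def getSpiralCornersFuel (fuel : Nat) (width : Int) : List Int :=
  match fuel with
  | 0 => []
  | fuel + 1 =>
    if width = 1 then [1]
    else
      let smaller_grid := getSpiralCornersFuel fuel (width - 2)
      let largest_smaller_grid_corner := (PySem.List.pyGet? smaller_grid (-1)).getD 0
      let corner_distance :=
        if (PySem.List.pyGet? smaller_grid 0).getD 0 = 1 then (2 : Int)
        else ((PySem.List.pyGet? smaller_grid 1).getD 0 - (PySem.List.pyGet? smaller_grid 0).getD 0) + 2
      (List.range 4).foldl
        (fun corners i => corners ++ [largest_smaller_grid_corner + corner_distance + (corner_distance * (i : Int))]) []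

def get_spiral_corners (width : Int) : List Int :=
  getSpiralCornersFuel (width.toNat + 1) width

-- ===== PORT B =====
-- the ValueError guard (invalid width) is outside Pre_; the port returns [] there
def get_spiral_corners_alt (width : Int) : List Int :=
  if width < 1 ∨ width % 2 = 0 then []
  else if width = 1 then [1]
  else [(3 : Int), 2, 1, 0].map (fun k => width * width - k * (width - 1))

-- ===== PRECONDITION & SPEC =====
-- A recurses on width-2 and only stops at width == 1: on even or non-positive widths the
-- Python recursion never terminates (RecursionError), so Pre_ admits exactly the odd positive widths.
def Pre_get_spiral_corners (width : Int) : Prop := 1 ≤ width ∧ width % 2 = 1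
instance (width : Int) : Decidable (Pre_get_spiral_corners width) := by unfold Pre_get_spiral_corners; infer_instance
def pvWitness_get_spiral_corners : Int := (5)

def Spec_get_spiral_corners (width : Int) (out : List Int) : Prop := out = get_spiral_corners_alt width
instance (width : Int) (out : List Int) : Decidable (Spec_get_spiral_corners width out) := by unfold Spec_get_spiral_corners; infer_instance

-- ===== CLAIM (what is proved, stated in full; the proofs are below) =====
def Claim_equal_get_spiral_corners : Prop := ∀ (width : Int), Dom_get_spiral_corners width → Pre_get_spiral_corners width → Spec_get_spiral_corners width (get_spiral_corners width)

-- ===== LEMMAS AND PROOFS =====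

-- key lemma: with enough fuel, the recursion computes B's closed form, by induction on n (width = 2n+1)
lemma fuel_eq_alt (n : Nat) : ∀ fuel : Nat, n + 1 ≤ fuel →
    getSpiralCornersFuel fuel (2 * (n : Int) + 1) = get_spiral_corners_alt (2 * (n : Int) + 1) := by
  induction n with
  | zero =>
    intro fuel hf
    match fuel, hf with
    | fuel + 1, _ => simp [getSpiralCornersFuel, get_spiral_corners_alt]
  | succ m ih =>
    intro fuel hf
    match fuel, hf with
    | fuel + 1, hf =>
      have hm : m + 1 ≤ fuel := by omega
      have hrec : (2 * ((m : Int) + 1) + 1) - 2 = 2 * (m : Int) + 1 := by ring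
      have hne : (2 * ((m : Int) + 1) + 1) ≠ 1 := by omega
      simp only [getSpiralCornersFuel, Nat.cast_succ, hne, if_false, hrec, ih fuel hm]
      cases m with
      | zero =>
        norm_num [get_spiral_corners_alt, PySem.List.pyGet?, PySem.List.pyIdx?, List.range_succ]
      | succ p =>
        have hne' : (2 * ((p : Int) + 1) + 1) ≠ 1 := by omega
        have hpos : ¬(2 * ((p : Int) + 1) < 0) := by omega
        have hpos' : ¬(2 * ((p : Int) + 1 + 1) < 0) := by omega
        simp only [get_spiral_corners_alt, Nat.cast_succ, hne', if_false, List.map]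
        norm_num [PySem.List.pyGet?, PySem.List.pyIdx?, List.range_succ, hpos, hpos']
        have hcond : ¬((2 * ((p : Int) + 1) + 1) * (2 * ((p : Int) + 1) + 1)
            - 3 * (2 * ((p : Int) + 1)) = 1) := by
          nlinarith [sq_nonneg ((p : Int))]
        have hne0 : ¬((p : Int) + 1 + 1 = 0) := by omega
        simp only [if_neg hcond, if_neg hne0, List.cons.injEq, and_true]
        refine ⟨by ring, by ring, by ring, by ring⟩

-- ===== VERDICT (by name: the statement is the Claim_ definition above) =====
theorem get_spiral_corners_spec : Claim_equal_get_spiral_corners := by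
  intro width _ hpre
  obtain ⟨h1, h2⟩ := hpre
  -- width = 2n+1 for some n
  obtain ⟨n, hn⟩ : ∃ n : Nat, width = 2 * (n : Int) + 1 := by
    refine ⟨((width - 1) / 2).toNat, ?_⟩
    omega
  subst hn
  unfold Spec_get_spiral_corners get_spiral_corners
  apply fuel_eq_alt
  omega
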